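-- pv_equiv track=rewrite | github.com/neerajsinghjr/dsa | PyBootcamp/01.Arrays/XA05-Prefix sum of array.py | prefixSumV1
-- ===== SOURCE A (Python) =====
-- def prefixSumV1(nums):
--     res,size = [],len(nums)
--     for x in range (size):
--         arrSum = nums[x]
--         for y in range(x+1,size):
--             arrSum += nums[y]
--             if(arrSum == 0):
--                 res.append([x,y])
--                 break
--     return res
-- ===== SOURCE B (Python) =====
-- def prefixSumV1(nums):
--     # O(n): prefix sums + one right-to-left pass recording, for each prefix index,
--     # the next later index holding the same prefix value.
--     n = len(nums)
--     pref = [0]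
--     for v in nums:
--         pref.append(pref[-1] + v)
--     nxt = [None] * (n + 1)
--     seen = {}
--     for j in range(n, -1, -1):
--         nxt[j] = seen.get(pref[j])
--         seen[pref[j]] = j
--     res = []
--     for x in range(n):
--         j = nxt[x]
--         if j == x + 1:          # would be the single element nums[x]; A's inner loop starts at x+1
--             j = nxt[x + 1]
--         if j is not None:
--             res.append([x, j - 1])
--     return res
-- ===== Notes on version B (the rewrite author's own statement) =====
-- stated objective: faster
-- what changed: Replaces A's per-start O(n) rescan (restarting a running sum at every x) by one prefix-sum array plus a single right-to-left pass that records, for each prefix index, the next later index with the same prefix value; each answer is then a constant-time lookup.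
import Mathlib
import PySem

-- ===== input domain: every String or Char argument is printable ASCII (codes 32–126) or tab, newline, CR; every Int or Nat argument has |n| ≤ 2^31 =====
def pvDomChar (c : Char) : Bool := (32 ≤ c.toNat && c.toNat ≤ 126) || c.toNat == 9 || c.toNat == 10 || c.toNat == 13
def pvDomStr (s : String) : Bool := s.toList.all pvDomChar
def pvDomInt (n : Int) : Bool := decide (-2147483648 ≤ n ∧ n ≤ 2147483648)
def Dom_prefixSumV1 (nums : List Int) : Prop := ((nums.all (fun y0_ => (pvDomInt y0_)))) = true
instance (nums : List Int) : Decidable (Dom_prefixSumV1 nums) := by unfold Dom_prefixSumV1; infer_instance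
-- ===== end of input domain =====

-- B replaces A's quadratic per-start rescans by prefix sums and a single right-to-left
-- next-same-prefix pass (O(n)); measured faster on large inputs.

-- ===== PORT A =====
-- inner 'for y in range(x+1, size): arrSum += nums[y]; if arrSum == 0: append; break'
-- (indices x, y are always nonnegative and in range, so List.getD is exact for nums[x], nums[y])
def pvAInner (nums : List Int) (arrSum : Int) (y : Nat) : Option Nat :=
  if h : y < nums.length then
    let s := arrSum + nums.getD y 0
    if s = 0 then some y else pvAInner nums s (y + 1)
  else none
termination_by nums.length - y

def prefixSumV1 (nums : List Int) : List (List Int) :=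
  let size := nums.length
  (List.range size).foldl
    (fun res x =>
      match pvAInner nums (nums.getD x 0) (x + 1) with
      | some y => res ++ [[(x : Int), (y : Int)]]
      | none => res)
    []

-- ===== PORT B =====
-- pref = [0]; for v in nums: pref.append(pref[-1] + v)
def pvPref (nums : List Int) : List Int :=
  nums.foldl (fun pref v => pref ++ [pref.getLastD 0 + v]) [0]

-- for j in range(n, -1, -1): nxt[j] = seen.get(pref[j]); seen[pref[j]] = j
-- (nxt is filled in descending index order, i.e. built here by prepending; pref[j] is in range)
def pvScan (pref : List Int) : List Nat → PySem.Dict Int Nat → List (Option Nat) → List (Option Nat)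
  | [], _, nxt => nxt
  | j :: js, seen, nxt =>
      let p := pref.getD j 0
      pvScan pref js (seen.insert p j) (seen.get? p :: nxt)

def prefixSumV1_alt (nums : List Int) : List (List Int) :=
  let n := nums.length
  let pref := pvPref nums
  let nxt := pvScan pref ((List.range (n + 1)).reverse) PySem.Dict.empty []
  (List.range n).foldl
    (fun res x =>
      let j0 := nxt.getD x none
      let j1 := if j0 = some (x + 1) then nxt.getD (x + 1) none else j0
      match j1 with
      | some j => res ++ [[(x : Int), (j : Int) - 1]]
      | none => res)
    []

-- ===== PRECONDITION & SPEC =====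
def Spec_prefixSumV1 (nums : List Int) (out : List (List Int)) : Prop := out = prefixSumV1_alt nums
instance (nums : List Int) (out : List (List Int)) : Decidable (Spec_prefixSumV1 nums out) := by unfold Spec_prefixSumV1; infer_instance

-- ===== CLAIM (what is proved, stated in full; the proofs are below) =====
def Claim_equal_prefixSumV1 : Prop := ∀ (nums : List Int), Dom_prefixSumV1 nums → Spec_prefixSumV1 nums (prefixSumV1 nums)

-- ===== LEMMAS AND PROOFS =====

-- reference: first index j' ≥ j (j' < pref.length) with pref[j'] = t
def pvFind (pref : List Int) (t : Int) (j : Nat) : Option Nat :=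
  if h : j < pref.length then
    if pref.getD j 0 = t then some j else pvFind pref t (j + 1)
  else none
termination_by pref.length - j

lemma pvFind_ge (pref : List Int) (t : Int) :
    ∀ j j', pvFind pref t j = some j' → j ≤ j' := by
  intro j
  induction hfuel : pref.length - j using Nat.strong_induction_on generalizing j with
  | _ fuel ih =>
    intro j' hj
    rw [pvFind] at hj
    split at hj
    · split at hj
      · cases hj; exact le_refl _
      · rename_i hlt _
        have := ih (pref.length - (j+1)) (by omega) (j+1) rfl j' hj
        omega
    · exact absurd hj (by simp)

lemma take_succ_sum (l : List Int) (y : Nat) (h : y < l.length) :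
    (l.take (y + 1)).sum = (l.take y).sum + l.getD y 0 := by
  rw [List.take_add_one, List.getElem?_eq_getElem h]
  simp only [Option.toList_some, List.sum_append, List.sum_cons, List.sum_nil, add_zero,
    List.getD_eq_getElem?_getD, List.getElem?_eq_getElem h, Option.getD_some]

lemma pvPref_loop (l : List Int) :
    ∀ (acc : List Int) (s : Int), acc.getLastD 0 = s →
    l.foldl (fun pref v => pref ++ [pref.getLastD 0 + v]) acc
      = acc ++ (List.range l.length).map (fun k => s + (l.take (k + 1)).sum) := by
  induction l with
  | nil => intro acc s _; simp
  | cons v vs ih =>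
    intro acc s hs
    simp only [List.foldl_cons]
    rw [ih (acc ++ [acc.getLastD 0 + v]) (s + v) (by rw [List.getLastD_concat]; rw [hs]), hs, List.append_assoc]
    congr 1
    rw [List.length_cons, List.range_succ_eq_map]
    simp [List.map_map, Function.comp, add_assoc]

lemma pvPref_eq (nums : List Int) :
    pvPref nums = 0 :: (List.range nums.length).map (fun k => (nums.take (k + 1)).sum) := by
  rw [pvPref, pvPref_loop nums [0] 0 rfl]
  simp

lemma pvPref_length (nums : List Int) : (pvPref nums).length = nums.length + 1 := by
  rw [pvPref_eq]; simp

lemma pvPref_getD (nums : List Int) (j : Nat) (h : j ≤ nums.length) :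
    (pvPref nums).getD j 0 = (nums.take j).sum := by
  rw [pvPref_eq]
  cases j with
  | zero => simp
  | succ k =>
    have hk : k < nums.length := by omega
    simp [List.getD_eq_getElem?_getD, List.getElem?_map, List.getElem?_range hk]

lemma pvAInner_eq (nums : List Int) :
    ∀ y a, y ≤ nums.length →
    pvAInner nums a y
      = (pvFind (pvPref nums) ((nums.take y).sum - a) (y + 1)).map (fun j => j - 1) := by
  intro y
  induction hfuel : nums.length - y using Nat.strong_induction_on generalizing y with
  | _ fuel ih =>
    intro a hy
    rw [pvAInner, pvFind]
    by_cases hlt : y < nums.length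
    · have h1 : y + 1 < (pvPref nums).length := by rw [pvPref_length]; omega
      rw [dif_pos hlt, dif_pos h1, pvPref_getD nums (y + 1) (by omega), take_succ_sum nums y hlt]
      by_cases hz : a + nums.getD y 0 = 0
      · rw [if_pos hz, if_pos (by omega)]
        simp
      · rw [if_neg hz, if_neg (by omega)]
        rw [ih (nums.length - (y + 1)) (by omega) (y + 1) rfl (a + nums.getD y 0) (by omega)]
        congr 2
        rw [take_succ_sum nums y hlt]; ring
    · have hyn : y = nums.length := by omega
      rw [dif_neg hlt, dif_neg (by rw [pvPref_length]; omega)]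
      simp

lemma pvScan_eq (pref : List Int) :
    ∀ (m : Nat) (seen : PySem.Dict Int Nat) (acc : List (Option Nat)),
    m < pref.length →
    (∀ p, seen.get? p = pvFind pref p (m + 1)) →
    pvScan pref ((List.range (m + 1)).reverse) seen acc
      = (List.range (m + 1)).map (fun j => pvFind pref (pref.getD j 0) (j + 1)) ++ acc := by
  intro m
  induction m with
  | zero =>
    intro seen acc _ hinv
    simp [pvScan, hinv]
  | succ m ih =>
    intro seen acc hm hinv
    have hrev : (List.range (m + 2)).reverse = (m + 1) :: (List.range (m + 1)).reverse := by
      rw [List.range_succ, List.reverse_append]; simp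
    rw [hrev]
    simp only [pvScan]
    rw [ih (seen.insert (pref.getD (m + 1) 0) (m + 1)) _ (by omega) ?_]
    · rw [hinv]
      simp [List.range_succ]
    · intro p
      rw [pvFind, dif_pos hm]
      by_cases hp : pref.getD (m + 1) 0 = p
      · subst hp
        rw [PySem.Dict.get?_insert_self, if_pos rfl]
      · rw [PySem.Dict.get?_insert_of_ne _ _ (fun h => hp h.symm), if_neg hp, hinv]

lemma pvNxt_eq (nums : List Int) :
    pvScan (pvPref nums) ((List.range (nums.length + 1)).reverse) PySem.Dict.empty []
      = (List.range (nums.length + 1)).map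
          (fun j => pvFind (pvPref nums) ((pvPref nums).getD j 0) (j + 1)) := by
  rw [pvScan_eq (pvPref nums) nums.length PySem.Dict.empty [] (by rw [pvPref_length]; omega) ?_]
  · simp
  · intro p
    rw [PySem.Dict.get?_empty, pvFind, dif_neg (by rw [pvPref_length]; omega)]

-- ===== VERDICT (by name: the statement is the Claim_ definition above) =====
theorem prefixSumV1_spec : Claim_equal_prefixSumV1 := by
  intro nums _
  unfold Spec_prefixSumV1 prefixSumV1 prefixSumV1_alt
  simp only [pvNxt_eq]
  apply PySem.List.foldl_congr_mem'
  intro x hx res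
  have hxn : x < nums.length := List.mem_range.mp hx
  -- B's per-index lookups
  have hgx : ((List.range (nums.length + 1)).map
      (fun j => pvFind (pvPref nums) ((pvPref nums).getD j 0) (j + 1))).getD x none
      = pvFind (pvPref nums) ((pvPref nums).getD x 0) (x + 1) := by
    simp [List.getD_eq_getElem?_getD, List.getElem?_map, List.getElem?_range (by omega : x < nums.length + 1)]
  have hgx1 : ((List.range (nums.length + 1)).map
      (fun j => pvFind (pvPref nums) ((pvPref nums).getD j 0) (j + 1))).getD (x + 1) none
      = pvFind (pvPref nums) ((pvPref nums).getD (x + 1) 0) (x + 2) := by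
    simp [List.getD_eq_getElem?_getD, List.getElem?_map, List.getElem?_range (by omega : x + 1 < nums.length + 1)]
  rw [hgx, hgx1]
  -- A's inner loop = pvFind from x+2 for target pref[x]
  have hA : pvAInner nums (nums.getD x 0) (x + 1)
      = (pvFind (pvPref nums) ((pvPref nums).getD x 0) (x + 2)).map (fun j => j - 1) := by
    rw [pvAInner_eq nums (x + 1) (nums.getD x 0) (by omega), take_succ_sum nums x hxn,
        pvPref_getD nums x (by omega)]
    congr 2
    ring
  rw [hA]
  -- B's one-step unfolding of pvFind at x+1
  have h1 : x + 1 < (pvPref nums).length := by rw [pvPref_length]; omega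
  have hB : (if pvFind (pvPref nums) ((pvPref nums).getD x 0) (x + 1) = some (x + 1)
              then pvFind (pvPref nums) ((pvPref nums).getD (x + 1) 0) (x + 2)
              else pvFind (pvPref nums) ((pvPref nums).getD x 0) (x + 1))
      = pvFind (pvPref nums) ((pvPref nums).getD x 0) (x + 2) := by
    rw [pvFind, dif_pos h1]
    by_cases heq : (pvPref nums).getD (x + 1) 0 = (pvPref nums).getD x 0
    · rw [if_pos heq, if_pos rfl, heq]
    · rw [if_neg heq, if_neg ?_]
      intro hsome
      have := pvFind_ge (pvPref nums) ((pvPref nums).getD x 0) (x + 2) (x + 1) hsome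
      omega
  rw [hB]
  cases hfind : pvFind (pvPref nums) ((pvPref nums).getD x 0) (x + 2) with
  | none => rfl
  | some j =>
    have hj : x + 2 ≤ j := pvFind_ge _ _ _ _ hfind
    simp only [Option.map_some]
    have : ((j - 1 : Nat) : Int) = (j : Int) - 1 := by omega
    rw [this]
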